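-- pv_equiv track=rewrite | github.com/learn-ukrainian/learn-ukrainian.github.io | scripts/build/plan_tracking.py | ordered_phases_from
-- ===== SOURCE A (Python) =====
-- def ordered_phases_from(
--     phase_order: list[str] | tuple[str, ...],
--     start_phase: str,
--     existing_phases: dict[str, object] | None = None,
-- ) -> tuple[str, ...]:
--     """Return pipeline phases from start_phase onward, preserving pipeline order."""
--     try:
--         start_idx = phase_order.index(start_phase)
--     except ValueError:
--         return ()
--
--     ordered = phase_order[start_idx:]
--     if existing_phases is None:
--         return tuple(ordered)
--     return tuple(phase for phase in ordered if phase in existing_phases)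
-- ===== SOURCE B (Python) =====
-- def ordered_phases_from(
--     phase_order,
--     start_phase,
--     existing_phases=None,
-- ):
--     """Single stateful pass: carry a 'started' flag instead of index+slice+filter."""
--     result = []
--     started = False
--     for phase in phase_order:
--         if not started and phase == start_phase:
--             started = True
--         if started and (existing_phases is None or phase in existing_phases):
--             result.append(phase)
--     return tuple(result)
-- ===== Notes on version B (the rewrite author's own statement) =====
-- stated objective: alternative
-- what changed: Replaces index()+slice+generator-filter with one loop over phase_order carrying a 'started' boolean flag and appending matching phases as it goes.
import Mathlib
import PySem

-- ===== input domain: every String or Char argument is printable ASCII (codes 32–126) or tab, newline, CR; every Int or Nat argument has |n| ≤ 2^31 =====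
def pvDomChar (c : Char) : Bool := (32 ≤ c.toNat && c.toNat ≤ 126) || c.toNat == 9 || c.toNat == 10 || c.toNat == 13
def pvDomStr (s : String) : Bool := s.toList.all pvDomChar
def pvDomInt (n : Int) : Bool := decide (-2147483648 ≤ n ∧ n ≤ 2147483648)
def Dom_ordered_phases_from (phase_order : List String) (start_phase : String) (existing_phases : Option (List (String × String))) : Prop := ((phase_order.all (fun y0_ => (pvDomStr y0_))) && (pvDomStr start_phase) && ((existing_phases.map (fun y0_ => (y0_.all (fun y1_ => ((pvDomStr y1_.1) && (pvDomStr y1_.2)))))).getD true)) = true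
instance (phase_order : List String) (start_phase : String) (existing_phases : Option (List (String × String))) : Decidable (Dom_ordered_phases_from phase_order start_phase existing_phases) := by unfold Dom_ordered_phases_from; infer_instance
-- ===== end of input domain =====

-- B replaces A's index()+slice+filter with one pass carrying a 'started' flag (alternative decomposition, same cost).

-- ===== PORT A =====
-- 'phase in existing_phases' = dict key membership (first-match irrelevant for membership)
def pvKeyMem (d : List (String × String)) (p : String) : Bool := d.any (fun kv => kv.1 == p)

def ordered_phases_from (phase_order : List String) (start_phase : String) (existing_phases : Option (List (String × String))) : List String :=
  match PySem.List.index? phase_order start_phase with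
  | none => []                                   -- except ValueError: return ()
  | some start_idx =>
    let ordered := PySem.List.slice phase_order (some (start_idx : Int)) none
    match existing_phases with
    | none => ordered
    | some d => ordered.filter (fun phase => pvKeyMem d phase)

-- ===== PORT B =====
-- the loop body of Source B, as a foldl over (started, result)
def pvBStep (start_phase : String) (existing_phases : Option (List (String × String)))
    (st : Bool × List String) (phase : String) : Bool × List String :=
  let started := if !st.1 && (phase == start_phase) then true else st.1
  if started && (match existing_phases with
                 | none => true
                 | some d => pvKeyMem d phase)
  then (started, st.2 ++ [phase]) else (started, st.2)

def ordered_phases_from_alt (phase_order : List String) (start_phase : String) (existing_phases : Option (List (String × String))) : List String :=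
  (phase_order.foldl (pvBStep start_phase existing_phases) (false, [])).2

-- ===== PRECONDITION & SPEC =====
def Spec_ordered_phases_from (phase_order : List String) (start_phase : String) (existing_phases : Option (List (String × String))) (out : List String) : Prop := out = ordered_phases_from_alt phase_order start_phase existing_phases
instance (phase_order : List String) (start_phase : String) (existing_phases : Option (List (String × String))) (out : List String) : Decidable (Spec_ordered_phases_from phase_order start_phase existing_phases out) := by unfold Spec_ordered_phases_from; infer_instance

-- ===== CLAIM (what is proved, stated in full; the proofs are below) =====
def Claim_equal_ordered_phases_from : Prop := ∀ (phase_order : List String) (start_phase : String) (existing_phases : Option (List (String × String))), Dom_ordered_phases_from phase_order start_phase existing_phases → Spec_ordered_phases_from phase_order start_phase existing_phases (ordered_phases_from phase_order start_phase existing_phases)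

-- ===== LEMMAS AND PROOFS =====

-- the phase-keeping predicate shared by both characterisations
def pvKeep (existing_phases : Option (List (String × String))) (p : String) : Bool :=
  match existing_phases with
  | none => true
  | some d => pvKeyMem d p

theorem pvBStep_snd (sp : String) (ep : Option (List (String × String)))
    (b : Bool) (acc : List String) (x : String) :
    pvBStep sp ep (b, acc) x =
      ((pvBStep sp ep (b, []) x).1, acc ++ (pvBStep sp ep (b, []) x).2) := by
  simp only [pvBStep]
  split <;> split <;> split_ifs <;> simp

-- accumulator lemma: the result list is acc ++ (run from empty)
theorem pvFold_acc (sp : String) (ep : Option (List (String × String))) :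
    ∀ (xs : List String) (b : Bool) (acc : List String),
      List.foldl (pvBStep sp ep) (b, acc) xs =
        ((List.foldl (pvBStep sp ep) (b, []) xs).1,
         acc ++ (List.foldl (pvBStep sp ep) (b, []) xs).2) := by
  intro xs
  induction xs with
  | nil => intro b acc; simp
  | cons x xs ih =>
    intro b acc
    simp only [List.foldl_cons]
    rw [pvBStep_snd]
    obtain ⟨b', δ⟩ := pvBStep sp ep (b, []) x
    rw [ih b' δ, ih b' (acc ++ δ)]
    simp

-- once started, the pass is a filter by pvKeep
theorem pvFold_true (sp : String) (ep : Option (List (String × String))) :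
    ∀ (xs : List String),
      (List.foldl (pvBStep sp ep) (true, []) xs).2 = xs.filter (pvKeep ep) := by
  intro xs
  induction xs with
  | nil => simp
  | cons x xs ih =>
    simp only [List.foldl_cons]
    have hstep : pvBStep sp ep (true, []) x =
        (true, if pvKeep ep x then [x] else []) := by
      cases ep <;> simp only [pvBStep, pvKeep] <;> split_ifs <;> simp_all
    rw [hstep]
    rw [pvFold_acc sp ep xs true (if pvKeep ep x then [x] else [])]
    rw [List.filter_cons]
    by_cases h : pvKeep ep x <;> simp [h, ih]

-- before the start phase is seen, B computes index?-then-drop-then-filter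
theorem pvFold_false (sp : String) (ep : Option (List (String × String))) :
    ∀ (xs : List String),
      (List.foldl (pvBStep sp ep) (false, []) xs).2 =
        (match PySem.List.index? xs sp with
         | none => []
         | some i => (xs.drop i).filter (pvKeep ep)) := by
  intro xs
  induction xs with
  | nil => simp [PySem.List.index?]
  | cons x xs ih =>
    by_cases hx : x = sp
    · rw [hx, PySem.List.index?_cons_self]
      simp only [List.foldl_cons]
      have hstep : pvBStep sp ep (false, []) sp =
          (true, if pvKeep ep sp then [sp] else []) := by
        cases ep <;> simp only [pvBStep, pvKeep] <;> split_ifs <;> simp_all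
      rw [hstep, pvFold_acc sp ep xs true _, pvFold_true sp ep xs]
      rw [List.drop_zero, List.filter_cons]
      by_cases h : pvKeep ep sp <;> simp [h]
    · rw [PySem.List.index?_cons_of_ne _ hx]
      simp only [List.foldl_cons]
      have hstep : pvBStep sp ep (false, []) x = (false, []) := by
        simp [pvBStep, hx]
      rw [hstep, ih]
      cases h : PySem.List.index? xs sp <;> simp

theorem ordered_phases_from_eq (phase_order : List String) (start_phase : String)
    (existing_phases : Option (List (String × String))) :
    ordered_phases_from phase_order start_phase existing_phases =
      ordered_phases_from_alt phase_order start_phase existing_phases := by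
  unfold ordered_phases_from ordered_phases_from_alt
  rw [pvFold_false]
  cases h : PySem.List.index? phase_order start_phase with
  | none => rfl
  | some i =>
    simp only [PySem.List.slice_from_natCast]
    cases existing_phases with
    | none => rw [show pvKeep none = fun _ => true from rfl, List.filter_true]
    | some d => rfl

-- ===== VERDICT (by name: the statement is the Claim_ definition above) =====
theorem ordered_phases_from_spec : Claim_equal_ordered_phases_from := by
  intro po sp ep _
  exact ordered_phases_from_eq po sp ep
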